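-- pv_equiv track=rewrite | github.com/Meghadri-Koley/Python-Games-and-Projects | 2048 game/2048.py | adding
-- ===== SOURCE A (Python) =====
-- def adding(arr, space, num):
--     c = 0
--     for i in range(4):
--         for j in range(4):
--             if space == c:
--                 arr[i][j] = num
--             c = c+1
--     return arr
-- ===== SOURCE B (Python) =====
-- def adding(arr, space, num):
--     if 0 <= space < 16:
--         i, j = divmod(space, 4)
--         arr[i][j] = num
--     return arr
-- ===== Notes on version B (the rewrite author's own statement) =====
-- stated objective: idiomatic
-- what changed: B replaces the 4x4 double loop with a running counter by direct index arithmetic (i, j = divmod(space, 4)) guarded by a range check, writing the single cell at once.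
import Mathlib
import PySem

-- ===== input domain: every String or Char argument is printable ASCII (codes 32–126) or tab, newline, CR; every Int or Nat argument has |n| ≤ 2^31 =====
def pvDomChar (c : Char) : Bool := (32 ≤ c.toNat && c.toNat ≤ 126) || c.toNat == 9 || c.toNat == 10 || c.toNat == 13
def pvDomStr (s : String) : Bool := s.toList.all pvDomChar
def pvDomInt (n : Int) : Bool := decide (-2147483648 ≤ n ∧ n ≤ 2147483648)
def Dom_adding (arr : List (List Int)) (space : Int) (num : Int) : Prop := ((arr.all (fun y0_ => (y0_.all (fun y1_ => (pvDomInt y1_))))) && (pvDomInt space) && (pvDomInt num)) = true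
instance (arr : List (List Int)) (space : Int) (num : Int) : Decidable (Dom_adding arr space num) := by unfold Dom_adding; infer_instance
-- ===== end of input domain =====

-- B replaces A's 4x4 double loop with a running counter by direct index arithmetic
-- (i, j = divmod(space, 4)) under a range guard; return-value equivalence on Pre_.

-- arr[i][j] = num (in-range under Pre_; List.set is a no-op out of range, where Python raises)
def pvSet2 (arr : List (List Int)) (i j : Nat) (num : Int) : List (List Int) :=
  arr.set i ((arr.getD i []).set j num)

-- ===== PORT A =====
def adding (arr : List (List Int)) (space : Int) (num : Int) : List (List Int) :=
  let st :=
    (PySem.List.pyRange 0 4 1).foldl (fun (st : List (List Int) × Int) i =>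
      (PySem.List.pyRange 0 4 1).foldl (fun (st : List (List Int) × Int) j =>
        let st' := if space = st.2 then pvSet2 st.1 i.toNat j.toNat num else st.1
        (st', st.2 + 1)) st) (arr, 0)
  st.1

-- ===== PORT B =====
def adding_alt (arr : List (List Int)) (space : Int) (num : Int) : List (List Int) :=
  if 0 ≤ space ∧ space < 16 then
    pvSet2 arr (PySem.Int.floordiv space 4).toNat (PySem.Int.mod space 4).toNat num
  else arr

-- ===== PRECONDITION & SPEC =====
-- Pre_ excludes exactly the inputs where Python's arr[i][j] = num raises IndexError
-- (space in 0..15 but the target row/column does not exist); both A and B raise there.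
def Pre_adding (arr : List (List Int)) (space : Int) (num : Int) : Prop :=
  (0 ≤ space ∧ space < 16) →
    (space.toNat / 4 < arr.length ∧ space.toNat % 4 < (arr.getD (space.toNat / 4) []).length)
instance (arr : List (List Int)) (space : Int) (num : Int) : Decidable (Pre_adding arr space num) := by unfold Pre_adding; infer_instance

def pvWitness_adding : List (List Int) × Int × Int :=
  ([[0,0,0,0],[0,0,0,0],[0,0,0,0],[0,0,0,0]], 5, 2)

def Spec_adding (arr : List (List Int)) (space : Int) (num : Int) (out : List (List Int)) : Prop := out = adding_alt arr space num
instance (arr : List (List Int)) (space : Int) (num : Int) (out : List (List Int)) : Decidable (Spec_adding arr space num out) := by unfold Spec_adding; infer_instance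

-- ===== CLAIM (what is proved, stated in full; the proofs are below) =====
def Claim_equal_adding : Prop := ∀ (arr : List (List Int)) (space : Int) (num : Int), Dom_adding arr space num → Pre_adding arr space num → Spec_adding arr space num (adding arr space num)

-- ===== LEMMAS AND PROOFS =====

theorem adding_of_not_in_range (arr : List (List Int)) (space num : Int)
    (h : ¬ (0 ≤ space ∧ space < 16)) : adding arr space num = arr := by
  have h0 : space ≠ 0 := by omega
  have h1 : space ≠ 1 := by omega
  have h2 : space ≠ 2 := by omega
  have h3 : space ≠ 3 := by omega
  have h4 : space ≠ 4 := by omega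
  have h5 : space ≠ 5 := by omega
  have h6 : space ≠ 6 := by omega
  have h7 : space ≠ 7 := by omega
  have h8 : space ≠ 8 := by omega
  have h9 : space ≠ 9 := by omega
  have h10 : space ≠ 10 := by omega
  have h11 : space ≠ 11 := by omega
  have h12 : space ≠ 12 := by omega
  have h13 : space ≠ 13 := by omega
  have h14 : space ≠ 14 := by omega
  have h15 : space ≠ 15 := by omega
  simp [adding, PySem.List.pyRange, List.range_succ, h0, h1, h2, h3, h4, h5, h6, h7, h8, h9,
    h10, h11, h12, h13, h14, h15]

-- ===== VERDICT (by name: the statement is the Claim_ definition above) =====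
theorem adding_spec : Claim_equal_adding := by
  intro arr space num _ _
  unfold Spec_adding
  by_cases h : 0 ≤ space ∧ space < 16
  · obtain ⟨h1, h2⟩ := h
    interval_cases space <;> rfl
  · rw [adding_of_not_in_range arr space num h, adding_alt, if_neg h]
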